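-- pv_equiv track=rewrite | github.com/nkchangliu/puzzles | leetcode/delete_number.py | last_number
-- ===== SOURCE A (Python) =====
-- def last_number(n):
--     i, left,step, remaining = 1, 1, 1, n
--     while remaining > 1:
--         if left or remaining % 2:
--             i += step
--         left = 1 - left
--         step *= 2
--         remaining //= 2
--     return i
-- ===== SOURCE B (Python) =====
-- def last_number(n):
--     if n <= 1:
--         return 1
--     half = n // 2
--     return 2 * (half + 1 - last_number(half))
-- ===== Notes on version B (the rewrite author's own statement) =====
-- stated objective: simpler
-- what changed: Replaced the iterative loop with explicit direction/step/remaining state by the classic divide-and-conquer recurrence on the halved size that reconstructs the survivor from the sub-game's survivor.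
import Mathlib
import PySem

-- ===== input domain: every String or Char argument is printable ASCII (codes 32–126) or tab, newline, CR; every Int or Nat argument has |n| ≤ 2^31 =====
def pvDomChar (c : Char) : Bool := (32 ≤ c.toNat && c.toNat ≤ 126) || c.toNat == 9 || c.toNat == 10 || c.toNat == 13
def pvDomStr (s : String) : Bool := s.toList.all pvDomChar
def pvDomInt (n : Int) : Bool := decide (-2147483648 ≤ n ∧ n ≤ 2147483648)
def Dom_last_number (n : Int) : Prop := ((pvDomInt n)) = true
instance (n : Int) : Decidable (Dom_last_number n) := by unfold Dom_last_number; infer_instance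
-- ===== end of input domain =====

-- ===== PORT A =====
-- B replaces A's iterative direction/step/remaining loop with the classic divide-and-conquer
-- recurrence for the elimination game (objective: simpler).
-- the while-loop of A, state (i, left, step, remaining)
def lnLoop (i left step remaining : Int) : Int :=
  if h : remaining > 1 then
    lnLoop (if left ≠ 0 ∨ PySem.Int.mod remaining 2 ≠ 0 then i + step else i)
      (1 - left) (step * 2) (PySem.Int.floordiv remaining 2)
  else i
termination_by remaining.toNat
decreasing_by
  rw [PySem.Int.floordiv_eq_ediv_of_pos (by omega)]
  omega

def last_number (n : Int) : Int := lnLoop 1 1 1 n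

-- ===== PORT B =====
def last_number_alt (n : Int) : Int :=
  if n ≤ 1 then 1
  else
    let half := PySem.Int.floordiv n 2
    2 * (half + 1 - last_number_alt half)
termination_by n.toNat
decreasing_by
  rw [PySem.Int.floordiv_eq_ediv_of_pos (by omega)]
  omega

-- ===== PRECONDITION & SPEC =====
def Spec_last_number (n : Int) (out : Int) : Prop := out = last_number_alt n
instance (n : Int) (out : Int) : Decidable (Spec_last_number n out) := by unfold Spec_last_number; infer_instance

-- ===== CLAIM (what is proved, stated in full; the proofs are below) =====
def Claim_equal_last_number : Prop := ∀ (n : Int), Dom_last_number n → Spec_last_number n (last_number n)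

-- ===== LEMMAS AND PROOFS =====

theorem alt_of_le_one (n : Int) (h : n ≤ 1) : last_number_alt n = 1 := by
  rw [last_number_alt]; simp [h]

theorem alt_of_two_le (n : Int) (h : 2 ≤ n) :
    last_number_alt n =
      2 * (PySem.Int.floordiv n 2 + 1 - last_number_alt (PySem.Int.floordiv n 2)) := by
  rw [last_number_alt]; simp [show ¬ n ≤ 1 by omega]

-- core invariant: from a left-to-right state the loop lands on the left survivor,
-- from a right-to-left state on the right survivor r + 1 - L(r)
theorem lnLoop_eq (m : Nat) : ∀ (i step r : Int), 1 ≤ r → r.toNat = m →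
    lnLoop i 1 step r = i + step * (last_number_alt r - 1) ∧
    lnLoop i 0 step r = i + step * (r - last_number_alt r) := by
  induction m using Nat.strong_induction_on with
  | _ m ih =>
    intro i step r hr hm
    by_cases h1 : r ≤ 1
    · have hr1 : r = 1 := by omega
      subst hr1
      constructor <;> (rw [lnLoop]; simp [alt_of_le_one 1 (by omega)])
    · have h2 : 2 ≤ r := by omega
      have hfd : PySem.Int.floordiv r 2 = r / 2 :=
        PySem.Int.floordiv_eq_ediv_of_pos (by omega)
      have hmd : PySem.Int.mod r 2 = r % 2 :=
        PySem.Int.mod_eq_emod_of_pos (by omega)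
      have hq1 : 1 ≤ r / 2 := by omega
      have hqm : (r / 2).toNat < m := by omega
      have halt := alt_of_two_le r h2
      rw [hfd] at halt
      constructor
      · rw [lnLoop]
        simp only [show r > 1 from by omega, dif_pos, hfd]
        have : ((1:Int) ≠ 0 ∨ PySem.Int.mod r 2 ≠ 0) := Or.inl (by norm_num)
        rw [if_pos this]
        have := (ih (r / 2).toNat hqm (i + step) (step * 2) (r / 2) hq1 rfl).2
        rw [show (1:Int) - 1 = 0 by ring, this, halt]
        ring
      · rw [lnLoop]
        simp only [show r > 1 from by omega, dif_pos, hfd]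
        rw [show (1:Int) - 0 = 1 by ring]
        by_cases hodd : r % 2 = 0
        · rw [if_neg (by simp [hodd])]
          have := (ih (r / 2).toNat hqm i (step * 2) (r / 2) hq1 rfl).1
          rw [this, halt]
          have hsplit : r = 2 * (r / 2) := by omega
          linear_combination (-step) * hsplit
        · rw [if_pos (Or.inr (by simp [hodd]))]
          have := (ih (r / 2).toNat hqm (i + step) (step * 2) (r / 2) hq1 rfl).1
          rw [this, halt]
          have hsplit : r = 2 * (r / 2) + 1 := by omega
          linear_combination (-step) * hsplit

-- ===== VERDICT (by name: the statement is the Claim_ definition above) =====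
theorem last_number_spec : Claim_equal_last_number := by
  intro n _
  unfold Spec_last_number last_number
  by_cases h : n ≤ 1
  · rw [lnLoop, alt_of_le_one n h]
    simp [show ¬ n > 1 by omega]
  · have := (lnLoop_eq n.toNat 1 1 n (by omega) rfl).1
    rw [this]; ring
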